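-- pv_equiv track=rewrite | github.com/schneebergerlab/apricot_layer_mutations | python/get_candidate_for_mutant_phenotype_funcs.py | filterbgcnt
-- ===== SOURCE A (Python) =====
-- def filterbgcnt(fg, bg, cnt=1):
--     '''
--     Select positions present in all foreground list of positions, and then
--     filter out positions in bg.
--
--     If the position is present in more than cnt samples, then it would be filtered out.
--     '''
--     from collections import Counter, deque
--     fgmerge = fg[0].copy()
--     for i in range(1, len(fg)):
--         fgmerge = fgmerge.intersection(fg[i])
--     bgs = list(bg[0])
--     for i in range(1, len(bg)):
--         bgs += list(bg[i])
--     bgs = Counter(bgs)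
--     outfg = deque()
--     for pos in fgmerge:
--         try:
--             c = bgs[pos]
--         except KeyError:
--             outfg.append(pos)
--             continue
--         if c > cnt:
--             continue
--         outfg.append(pos)
--     return set(outfg)
-- ===== SOURCE B (Python) =====
-- def filterbgcnt(fg, bg, cnt=1):
--     '''
--     One pass over the first foreground set: keep a position iff every other
--     foreground set contains it and at most cnt background sets contain it.
--     No intersection calls, no flattening, no Counter: membership is tested
--     per candidate directly against each set.
--     '''
--     it = iter(fg)
--     first = next(it)
--     rest = list(it)
--     return {p for p in first
--             if all(p in s for s in rest)
--             and sum(p in s for s in bg) <= cnt}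
-- ===== Notes on version B (the rewrite author's own statement) =====
-- stated objective: alternative
-- what changed: B drops A's intersection fold, background flattening and Counter tally entirely: a single comprehension over the first foreground set tests each candidate's membership in every other foreground set and counts, per candidate, how many background sets contain it (valid because the background collections are sets, so the flattened tally of a position equals the number of background sets containing it).
import Mathlib
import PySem

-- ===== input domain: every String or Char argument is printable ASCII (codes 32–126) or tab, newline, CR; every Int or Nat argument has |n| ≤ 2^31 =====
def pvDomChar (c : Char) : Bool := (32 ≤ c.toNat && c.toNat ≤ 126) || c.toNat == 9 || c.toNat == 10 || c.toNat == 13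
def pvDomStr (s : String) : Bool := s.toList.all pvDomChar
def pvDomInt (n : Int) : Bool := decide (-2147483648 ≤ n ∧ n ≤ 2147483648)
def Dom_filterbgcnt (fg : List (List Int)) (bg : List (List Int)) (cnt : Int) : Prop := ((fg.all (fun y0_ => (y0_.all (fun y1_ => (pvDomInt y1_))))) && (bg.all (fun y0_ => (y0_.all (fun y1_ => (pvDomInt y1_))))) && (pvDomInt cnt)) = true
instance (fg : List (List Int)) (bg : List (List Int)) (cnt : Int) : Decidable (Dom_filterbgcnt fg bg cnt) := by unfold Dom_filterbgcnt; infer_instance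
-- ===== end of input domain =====

-- B (alternative): no intersection fold, no flattening, no Counter — one pass over the first
-- foreground set testing each candidate against the other sets directly; return value only.

-- ===== PORT A =====
-- literal transliteration of Source A: pairwise-intersection loop, background concatenation loop,
-- Counter, then a per-position append loop.  (A's 'except KeyError' branch is dead code:
-- Counter.__getitem__ returns 0 for a missing key, so c = bgs[pos] never raises.)
def filterbgcnt (fg : List (List Int)) (bg : List (List Int)) (cnt : Int) : List Int :=
  let fgmerge := (fg.drop 1).foldl (fun acc s => PySem.Set.inter acc s) (fg.headD [])
  let bgs := (bg.drop 1).foldl (fun acc s => acc ++ s) (bg.headD [])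
  let bgsC := PySem.Dict.counter bgs
  let outfg := fgmerge.foldl
      (fun out pos => if bgsC.getD pos 0 > cnt then out else out ++ [pos]) ([] : List Int)
  PySem.Set.ofList outfg

-- ===== PORT B =====
-- literal transliteration of Source B: first/rest split of fg, then one comprehension over
-- 'first' testing membership in every other fg set and summing, per candidate, the
-- memberships over the bg sets.
def filterbgcnt_alt (fg : List (List Int)) (bg : List (List Int)) (cnt : Int) : List Int :=
  let first := fg.headD []
  let rest := fg.drop 1
  PySem.Set.ofList (first.filter (fun p =>
    rest.all (fun s => PySem.Set.contains s p) &&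
    decide ((bg.foldl (fun acc s => acc + (if PySem.Set.contains s p then (1 : Int) else 0)) 0) ≤ cnt)))

-- ===== PRECONDITION & SPEC =====
-- Pre_ excludes fg = [] (A: IndexError on fg[0]; B: StopIteration) and bg = [] (A: IndexError
-- on bg[0]); the Nodup conditions are the set-encoding invariant: fg and bg hold Python SETS,
-- so each element list holds distinct values.
def Pre_filterbgcnt (fg : List (List Int)) (bg : List (List Int)) (cnt : Int) : Prop :=
  fg ≠ [] ∧ bg ≠ [] ∧ (∀ s ∈ fg, s.Nodup) ∧ (∀ s ∈ bg, s.Nodup)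
instance (fg : List (List Int)) (bg : List (List Int)) (cnt : Int) : Decidable (Pre_filterbgcnt fg bg cnt) := by unfold Pre_filterbgcnt; infer_instance
def pvWitness_filterbgcnt : List (List Int) × List (List Int) × Int := ([[1, 2]], [[2]], 1)

def Spec_filterbgcnt (fg : List (List Int)) (bg : List (List Int)) (cnt : Int) (out : List Int) : Prop := out = filterbgcnt_alt fg bg cnt
instance (fg : List (List Int)) (bg : List (List Int)) (cnt : Int) (out : List Int) : Decidable (Spec_filterbgcnt fg bg cnt out) := by unfold Spec_filterbgcnt; infer_instance

-- ===== CLAIM (what is proved, stated in full; the proofs are below) =====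
def Claim_equal_filterbgcnt : Prop := ∀ (fg : List (List Int)) (bg : List (List Int)) (cnt : Int), Dom_filterbgcnt fg bg cnt → Pre_filterbgcnt fg bg cnt → Spec_filterbgcnt fg bg cnt (filterbgcnt fg bg cnt)

-- ===== LEMMAS AND PROOFS =====

-- A's pairwise-intersection fold is one filter over the accumulator.
theorem foldl_inter_eq_filter_all (l : List (List Int)) (acc : List Int) :
    l.foldl (fun acc s => PySem.Set.inter acc s) acc
      = acc.filter (fun p => l.all (fun s => PySem.Set.contains s p)) := by
  induction l generalizing acc with
  | nil => simp
  | cons s t ih =>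
      rw [List.foldl_cons, ih]
      simp only [PySem.Set.inter, PySem.Set.contains, List.filter_filter, List.all_cons]
      congr 1; funext p; rw [Bool.and_comm]

-- A's background-concatenation loop is flatten.
theorem foldl_bgs_eq_flatten (bg : List (List Int)) :
    (bg.drop 1).foldl (fun acc s => acc ++ s) (bg.headD []) = bg.flatten := by
  rw [PySem.List.foldl_append_eq_flatten]
  cases bg <;> simp

-- For lists of distinct elements, B's per-candidate membership sum is the flattened count.
theorem foldl_membership_sum (bg : List (List Int)) (p : Int) (hnd : ∀ s ∈ bg, s.Nodup)
    (a : Int) :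
    bg.foldl (fun acc s => acc + (if PySem.Set.contains s p then (1 : Int) else 0)) a
      = a + (bg.flatten.count p : Int) := by
  induction bg generalizing a with
  | nil => simp
  | cons s t ih =>
      rw [List.foldl_cons, ih (fun x hx => hnd x (List.mem_cons_of_mem s hx))]
      have hs : (s.count p : Int) = if PySem.Set.contains s p then (1 : Int) else 0 := by
        by_cases hp : p ∈ s
        · simp [PySem.Set.contains, hp, List.count_eq_one_of_mem (hnd s List.mem_cons_self) hp]
        · simp [PySem.Set.contains, hp, List.count_eq_zero_of_not_mem hp]
      simp only [List.flatten_cons, List.count_append]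
      push_cast
      omega

theorem filterbgcnt_eq (fg : List (List Int)) (bg : List (List Int)) (cnt : Int)
    (hnd : ∀ s ∈ bg, s.Nodup) :
    filterbgcnt fg bg cnt = filterbgcnt_alt fg bg cnt := by
  simp only [filterbgcnt, filterbgcnt_alt]
  rw [foldl_inter_eq_filter_all, foldl_bgs_eq_flatten]
  rw [show (fun (out : List Int) pos =>
        if (PySem.Dict.counter bg.flatten).getD pos 0 > cnt then out else out ++ [pos])
      = fun out pos =>
        if ¬ ((PySem.Dict.counter bg.flatten).getD pos 0 > cnt) then out ++ [pos] else out from by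
    funext out pos; rw [ite_not]]
  rw [PySem.List.foldl_append_ite_eq_filter
      (p := fun pos => ¬ (PySem.Dict.counter bg.flatten).getD pos 0 > cnt), List.nil_append,
      List.filter_filter]
  congr 1
  apply List.filter_congr
  intro p _
  rw [foldl_membership_sum bg p hnd 0, Int.zero_add, PySem.Dict.getD_counter, Bool.and_comm]
  congr 1
  simp [not_lt]

-- ===== VERDICT (by name: the statements are the Claim_ definitions above) =====
theorem filterbgcnt_spec : Claim_equal_filterbgcnt := by
  intro fg bg cnt _ hpre
  exact filterbgcnt_eq fg bg cnt hpre.2.2.2
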